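-- pv_equiv track=rewrite | github.com/zestedesavoir/zds-site | zds/utils/templatetags/mkd_ext/grid_tables.py | _unindent_one_level
-- ===== SOURCE A (Python) =====
-- def _unindent_one_level(text):
--     """
--     Unindents the text one level, up to the index of the farthest-left
--     non-blank character in the text.
--     """
--     chars = 0
--     for i in range(0, len(max(text, key=len))):
--         for line in text:
--             if i < len(line) and line[i] != ' ':
--                 break
--         else:
--             chars += 1
--             continue # This skips the break below
--         break
--     for i in range(0, len(text)):
--         text[i] = text[i][chars:]
--     return text
-- ===== SOURCE B (Python) =====
-- def _unindent_one_level(text):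
--     """
--     Unindents the text one level, up to the index of the farthest-left
--     non-blank character in the text.
--     """
--     maxlen = len(max(text, key=len))
--     counts = [len(line) - len(line.lstrip(' ')) for line in text if line.lstrip(' ')]
--     chars = min(counts) if counts else maxlen
--     for i in range(len(text)):
--         text[i] = text[i][chars:]
--     return text
-- ===== Notes on version B (the rewrite author's own statement) =====
-- stated objective: simpler
-- what changed: Replaces A's column-by-column scan with for-else/break over range(len(longest line)) by a single row-major pass: per-line leading-space counts via lstrip(' ') for lines with non-space content, chars = min of those (or the longest line's length when every line is all spaces); the in-place suffix-slice loop and the ValueError on empty input are kept.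
import Mathlib
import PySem

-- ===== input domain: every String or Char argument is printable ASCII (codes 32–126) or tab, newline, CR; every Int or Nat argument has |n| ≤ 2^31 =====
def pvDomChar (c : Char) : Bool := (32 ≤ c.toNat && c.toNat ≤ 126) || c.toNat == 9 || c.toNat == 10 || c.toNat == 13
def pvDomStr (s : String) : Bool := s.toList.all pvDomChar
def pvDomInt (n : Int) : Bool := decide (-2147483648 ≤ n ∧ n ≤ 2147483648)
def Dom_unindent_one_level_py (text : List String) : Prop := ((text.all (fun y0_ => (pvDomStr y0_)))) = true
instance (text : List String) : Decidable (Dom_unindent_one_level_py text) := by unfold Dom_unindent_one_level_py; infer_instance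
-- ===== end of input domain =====

-- B changes the algorithm (row-major leading-space counts instead of A's column-by-column scan), keeps
-- the in-place mutation of `text` (equivalence here is about the returned value) and raises on [] like A.

-- ===== PORT A =====
-- inner 'for line in text: if i < len(line) and line[i] != ' ': break' — did some line break?
def uoInnerBreaks (text : List String) (i : Int) : Bool :=
  text.any (fun line => decide (i < PySem.Str.len line) && decide (PySem.Str.pyGet? line i ≠ some ' '))

-- outer 'for i in range(0, len(max(text, key=len))): … else: chars += 1; continue; break'
def uoOuter (text : List String) (idxs : List Int) (chars : Int) : Int :=
  match idxs with
  | [] => chars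
  | i :: rest => if uoInnerBreaks text i then chars else uoOuter text rest (chars + 1)

def unindent_one_level_py (text : List String) : List String :=
  match PySem.List.max? text (fun s => PySem.Str.len s) with
  | none => text  -- Python: max() raises ValueError on empty text (excluded by Pre_)
  | some m =>
    let chars := uoOuter text (PySem.List.pyRange 0 (PySem.Str.len m) 1) 0
    -- 'for i in range(0, len(text)): text[i] = text[i][chars:]'
    text.map (fun line => PySem.Str.slice line (some chars) none)

-- ===== PORT B =====
-- line.lstrip(' ') — exact: Python's lstrip(' ') removes exactly the leading ' ' characters
def uoLstripSpaces (line : String) : List Char := line.toList.dropWhile (· == ' ')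

def unindent_one_level_py_alt (text : List String) : List String :=
  match PySem.List.max? text (fun s => PySem.Str.len s) with
  | none => text  -- ValueError on empty text, as in B's Python (excluded by Pre_)
  | some m =>
    let counts := (text.filter (fun line => !(uoLstripSpaces line).isEmpty)).map
      (fun line => PySem.Str.len line - ((uoLstripSpaces line).length : Int))
    let chars := match PySem.List.min? counts (fun c => c) with
      | some c => c
      | none => PySem.Str.len m
    text.map (fun line => PySem.Str.slice line (some chars) none)

-- ===== PRECONDITION & SPEC =====
-- Pre_ excludes only the empty list, on which both Pythons raise ValueError (max() of empty sequence).
def Pre_unindent_one_level_py (text : List String) : Prop := text ≠ []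
instance (text : List String) : Decidable (Pre_unindent_one_level_py text) := by
  unfold Pre_unindent_one_level_py; infer_instance

def pvWitness_unindent_one_level_py : List String := ["  a", "   b", " "]

def Spec_unindent_one_level_py (text : List String) (out : List String) : Prop :=
  out = unindent_one_level_py_alt text
instance (text : List String) (out : List String) : Decidable (Spec_unindent_one_level_py text out) := by
  unfold Spec_unindent_one_level_py; infer_instance

-- ===== CLAIM (what is proved, stated in full; the proofs are below) =====
def Claim_equal_unindent_one_level_py : Prop := ∀ (text : List String), Dom_unindent_one_level_py text → Pre_unindent_one_level_py text → Spec_unindent_one_level_py text (unindent_one_level_py text)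

-- ===== LEMMAS AND PROOFS =====

-- A's outer loop, when no column in [a, b) breaks, counts the whole range
lemma uoOuter_nobreak (text : List String) (b : Int) :
    ∀ (n : Nat) (a c : Int), (b - a).toNat = n → 0 ≤ a →
    (∀ i, a ≤ i → i < b → uoInnerBreaks text i = false) →
    uoOuter text (PySem.List.pyRange a b 1) c = c + (b - a).toNat := by
  intro n
  induction n with
  | zero =>
    intro a c hn _ _
    rw [PySem.List.pyRange_one_eq_nil (by omega)]
    simp [uoOuter]; omega
  | succ k ih =>
    intro a c hn ha hno
    rw [PySem.List.pyRange_one_cons (by omega)]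
    simp only [uoOuter]
    rw [hno a le_rfl (by omega), if_neg Bool.false_ne_true]
    rw [ih (a + 1) (c + 1) (by omega) (by omega) (fun i h1 h2 => hno i (by omega) h2)]
    omega

-- A's outer loop stops at the first breaking column m
lemma uoOuter_break (text : List String) (b : Int) :
    ∀ (n : Nat) (a m c : Int), (b - a).toNat = n → a ≤ m → m < b →
    uoInnerBreaks text m = true →
    (∀ i, a ≤ i → i < m → uoInnerBreaks text i = false) →
    uoOuter text (PySem.List.pyRange a b 1) c = c + (m - a) := by
  intro n
  induction n with
  | zero => intro a m c hn h1 h2 _ _; omega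
  | succ k ih =>
    intro a m c hn h1 h2 hbr hno
    rw [PySem.List.pyRange_one_cons (by omega)]
    by_cases hma : a = m
    · subst hma
      simp [uoOuter, hbr]
    · have hlt : a < m := lt_of_le_of_ne h1 hma
      simp only [uoOuter]
      rw [hno a le_rfl hlt, if_neg Bool.false_ne_true]
      rw [ih (a + 1) m (c + 1) (by omega) (by omega) h2 hbr
        (fun i hi1 hi2 => hno i (by omega) hi2)]
      omega

-- the number of leading spaces of a line, as used by B
def uoLead (line : String) : Nat := (line.toList.takeWhile (· == ' ')).length

lemma uoCount_eq_lead (line : String) :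
    PySem.Str.len line - ((uoLstripSpaces line).length : Int) = (uoLead line : Int) := by
  have h := congrArg List.length (List.takeWhile_append_dropWhile (p := (· == ' ')) (l := line.toList))
  simp only [List.length_append] at h
  simp only [uoLstripSpaces, uoLead, PySem.Str.len_eq]
  omega

-- a character strictly inside the leading spaces is a space
lemma uoGet_of_lt_lead (line : String) (k : Nat) (hk : k < uoLead line) :
    line.toList[k]? = some ' ' := by
  have hsplit := List.takeWhile_append_dropWhile (p := (· == ' ')) (l := line.toList)
  have h1 : line.toList[k]? = (line.toList.takeWhile (· == ' '))[k]? := by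
    conv_lhs => rw [← hsplit]
    rw [List.getElem?_append_left (by simpa [uoLead] using hk)]
  rw [h1]
  rw [List.getElem?_eq_getElem (by simpa [uoLead] using hk)]
  have hmem : (line.toList.takeWhile (· == ' '))[k] ∈ line.toList.takeWhile (· == ' ') :=
    List.getElem_mem _
  have := List.mem_takeWhile_imp hmem
  simpa using congrArg some (by simpa using this)

-- the character at index uoLead, when the stripped line is nonempty, is not a space
lemma uoGet_at_lead (line : String) (h : (uoLstripSpaces line).isEmpty = false) :
    ∃ ch, line.toList[uoLead line]? = some ch ∧ ch ≠ ' ' := by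
  have hsplit := List.takeWhile_append_dropWhile (p := (· == ' ')) (l := line.toList)
  rcases hd : line.toList.dropWhile (· == ' ') with _ | ⟨ch, rest⟩
  · simp [uoLstripSpaces, hd] at h
  · refine ⟨ch, ?_, ?_⟩
    · have : line.toList = line.toList.takeWhile (· == ' ') ++ ch :: rest := by
        conv_lhs => rw [← hsplit, hd]
      rw [this, List.getElem?_append_right (by simp [uoLead])]
      simp [uoLead]
    · have := List.head?_dropWhile_not (p := (· == ' ')) (l := line.toList)
      rw [hd] at this
      simpa using this

lemma uoLead_lt_len (line : String) (h : (uoLstripSpaces line).isEmpty = false) :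
    uoLead line < line.toList.length := by
  obtain ⟨ch, hch, -⟩ := uoGet_at_lead line h
  exact List.getElem?_eq_some_iff.mp hch |>.choose

-- all-space line: every in-range character is a space
lemma uoGet_all_space (line : String) (h : (uoLstripSpaces line).isEmpty = true)
    (k : Nat) (hk : k < line.toList.length) : line.toList[k]? = some ' ' := by
  have hall : ∀ x ∈ line.toList, (x == ' ') = true := by
    apply List.dropWhile_eq_nil_iff.mp
    simpa [uoLstripSpaces, List.isEmpty_iff] using h
  rw [List.getElem?_eq_getElem hk]
  have := hall _ (List.getElem_mem hk)
  simpa using congrArg some (by simpa using this)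

-- unfold uoInnerBreaks at a Nat index into a statement about characters
lemma uoInnerBreaks_iff (text : List String) (k : Nat) :
    uoInnerBreaks text (k : Int) = true ↔
    ∃ line ∈ text, k < line.toList.length ∧ line.toList[k]? ≠ some ' ' := by
  simp only [uoInnerBreaks, List.any_eq_true, Bool.and_eq_true, decide_eq_true_eq]
  constructor
  · rintro ⟨line, hmem, hlt, hne⟩
    refine ⟨line, hmem, ?_, ?_⟩
    · have : (k : Int) < line.toList.length := by
        simpa [PySem.Str.len_eq, PySem.Chars.len_eq] using hlt
      exact_mod_cast this
    · rwa [PySem.Str.pyGet?_natCast] at hne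
  · rintro ⟨line, hmem, hlt, hne⟩
    refine ⟨line, hmem, ?_, ?_⟩
    · simp only [PySem.Str.len_eq]; exact_mod_cast hlt
    · rwa [PySem.Str.pyGet?_natCast]

-- key lemma: A's chars equals B's chars (the max?/min? data being fixed)
lemma uoChars_eq (text : List String) (m : String)
    (hmax : PySem.List.max? text (fun s => PySem.Str.len s) = some m) :
    uoOuter text (PySem.List.pyRange 0 (PySem.Str.len m) 1) 0 =
      (match PySem.List.min?
          ((text.filter (fun line => !(uoLstripSpaces line).isEmpty)).map
            (fun line => PySem.Str.len line - ((uoLstripSpaces line).length : Int)))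
          (fun c => c) with
        | some c => c
        | none => PySem.Str.len m) := by
  have hmlen : ∀ y ∈ text, PySem.Str.len y ≤ PySem.Str.len m := PySem.List.max?_isMax hmax
  have hm0 : 0 ≤ PySem.Str.len m := by
    simp [PySem.Str.len_eq]
  set counts := (text.filter (fun line => !(uoLstripSpaces line).isEmpty)).map
      (fun line => PySem.Str.len line - ((uoLstripSpaces line).length : Int)) with hcounts
  rcases hmin : PySem.List.min? counts (fun c => c) with _ | ⟨cmin⟩
  · -- counts empty: every line is all spaces; loop never breaks
    have hempty : counts = [] := (PySem.List.min?_eq_none_iff _ _).mp hmin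
    have hallsp : ∀ line ∈ text, (uoLstripSpaces line).isEmpty = true := by
      intro line hl
      by_contra hne
      have : line ∈ text.filter (fun line => !(uoLstripSpaces line).isEmpty) :=
        List.mem_filter.mpr ⟨hl, by simp [Bool.eq_false_iff.mpr hne]⟩
      have : PySem.Str.len line - ((uoLstripSpaces line).length : Int) ∈ counts :=
        hcounts ▸ List.mem_map_of_mem this
      simp [hempty] at this
    have hno : ∀ i, (0:Int) ≤ i → i < PySem.Str.len m → uoInnerBreaks text i = false := by
      intro i h0 hiL
      by_contra hbr
      simp only [Bool.not_eq_false] at hbr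
      lift i to Nat using h0 with k
      obtain ⟨line, hmem, hlt, hne⟩ := (uoInnerBreaks_iff text k).mp hbr
      exact hne (uoGet_all_space line (hallsp line hmem) k hlt)
    rw [uoOuter_nobreak text (PySem.Str.len m) (PySem.Str.len m - 0).toNat 0 0 rfl le_rfl hno]
    show 0 + (PySem.Str.len m - 0).toNat = PySem.Str.len m
    omega
  · -- counts nonempty: cmin = leading-space count of some line; loop breaks exactly there
    have hmem := PySem.List.min?_mem hmin
    have hisMin := PySem.List.min?_isMin hmin
    rw [hcounts] at hmem
    obtain ⟨l0, hl0f, hl0v⟩ := List.mem_map.mp hmem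
    obtain ⟨hl0t, hl0ne⟩ := List.mem_filter.mp hl0f
    have hl0ne' : (uoLstripSpaces l0).isEmpty = false := by
      simpa using hl0ne
    have hcm : cmin = (uoLead l0 : Int) := by rw [← hl0v, uoCount_eq_lead]
    have hcmlt : cmin < PySem.Str.len m := by
      have h1 : uoLead l0 < l0.toList.length := uoLead_lt_len l0 hl0ne'
      have h2 : PySem.Str.len l0 ≤ PySem.Str.len m := hmlen l0 hl0t
      simp only [PySem.Str.len_eq] at h2 ⊢
      omega
    have hcm0 : 0 ≤ cmin := by rw [hcm]; exact_mod_cast Nat.zero_le _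
    -- break at cmin
    have hbr : uoInnerBreaks text cmin = true := by
      rw [hcm]
      apply (uoInnerBreaks_iff text (uoLead l0)).mpr
      obtain ⟨ch, hch, hne⟩ := uoGet_at_lead l0 hl0ne'
      exact ⟨l0, hl0t, uoLead_lt_len l0 hl0ne', by rw [hch]; simpa using hne⟩
    -- no break before cmin
    have hno : ∀ i, (0:Int) ≤ i → i < cmin → uoInnerBreaks text i = false := by
      intro i h0 hilt
      by_contra hbr'
      simp only [Bool.not_eq_false] at hbr'
      lift i to Nat using h0 with k
      obtain ⟨line, hmemL, hlt, hne⟩ := (uoInnerBreaks_iff text k).mp hbr'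
      by_cases hsp : (uoLstripSpaces line).isEmpty = true
      · exact hne (uoGet_all_space line hsp k hlt)
      · have hspf : (uoLstripSpaces line).isEmpty = false := Bool.eq_false_iff.mpr hsp
        have hlf : line ∈ text.filter (fun line => !(uoLstripSpaces line).isEmpty) :=
          List.mem_filter.mpr ⟨hmemL, by simp [hspf]⟩
        have hcmem : PySem.Str.len line - ((uoLstripSpaces line).length : Int) ∈ counts :=
          hcounts ▸ List.mem_map_of_mem hlf
        have hle := hisMin _ hcmem
        rw [uoCount_eq_lead] at hle
        have hklt : k < uoLead line := by
          have : (k : Int) < (uoLead line : Int) := lt_of_lt_of_le hilt (by simpa using hle)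
          exact_mod_cast this
        exact hne (uoGet_of_lt_lead line k hklt)
    rw [uoOuter_break text (PySem.Str.len m) (PySem.Str.len m - 0).toNat 0 cmin 0 rfl hcm0
      hcmlt hbr hno]
    show 0 + (cmin - 0) = cmin
    omega

-- ===== VERDICT (by name: the statement is the Claim_ definition above) =====
theorem unindent_one_level_py_spec : Claim_equal_unindent_one_level_py := by
  intro text _hdom hpre
  unfold Spec_unindent_one_level_py unindent_one_level_py unindent_one_level_py_alt
  rcases hmax : PySem.List.max? text (fun s => PySem.Str.len s) with _ | ⟨m⟩
  · exact absurd ((PySem.List.max?_eq_none_iff _ _).mp hmax) hpre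
  · simp only []
    rw [uoChars_eq text m hmax]
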